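-- pv_equiv track=rewrite | github.com/yujin8731/prog | 3진법 뒤집기.py | solution
-- ===== SOURCE A (Python) =====
-- def solution(n):
--     a=''
--     while True:
--         a=str(n%3)+a
--         n=n//3
--         if n==0:
--             break
--     answer=0
--     for i in range(len(a)):
--         answer+=int(a[i])*3**i
--
--     return answer
-- ===== SOURCE B (Python) =====
-- def solution(n):
--     answer = 0
--     while True:
--         answer = answer * 3 + n % 3
--         n = n // 3
--         if n == 0:
--             break
--     return answer
-- ===== Notes on version B (the rewrite author's own statement) =====
-- stated objective: simpler
-- what changed: B accumulates the reversed base-3 value directly with Horner's rule in one loop, instead of building a digit string MSB-first and re-evaluating it in a second loop with 3**i.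
import Mathlib
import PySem

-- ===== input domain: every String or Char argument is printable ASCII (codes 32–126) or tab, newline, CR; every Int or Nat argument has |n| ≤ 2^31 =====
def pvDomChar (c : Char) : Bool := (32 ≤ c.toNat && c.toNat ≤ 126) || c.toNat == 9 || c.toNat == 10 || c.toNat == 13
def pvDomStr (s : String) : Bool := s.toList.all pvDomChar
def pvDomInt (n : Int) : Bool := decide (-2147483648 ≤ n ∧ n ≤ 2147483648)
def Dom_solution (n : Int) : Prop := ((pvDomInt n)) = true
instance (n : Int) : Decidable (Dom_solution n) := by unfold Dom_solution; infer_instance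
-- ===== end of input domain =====

-- B replaces A's build-a-digit-string-then-re-evaluate pair of loops by a single Horner loop; objective: simpler.

-- ===== PORT A =====
-- A's while loop: prepend str(n%3), n //= 3, break when n == 0.  The loop runs at
-- least once; fuel n.toNat + 1 is enough for every n ≥ 0 (the loop body strictly
-- decreases a nonnegative n, and fuel-exhaustion is unreachable under Pre_).
def solutionLoopA : Nat → Int → List Char → List Char
  | 0, _, a => a
  | f + 1, n, a =>
      let a' := (PySem.Int.toChars (PySem.Int.mod n 3)) ++ a
      let n' := PySem.Int.floordiv n 3
      if n' = 0 then a' else solutionLoopA f n' a'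

-- int(a[i]) : a[i] is a single digit character here, so ofStr? never returns none;
-- the getD 0 default is unreachable.
def solutionDig (a : List Char) (i : Int) : Int :=
  match PySem.List.pyGet? a i with
  | some c => (PySem.Int.ofChars? [c]).getD 0
  | none => 0

def solution (n : Int) : Int :=
  let a := solutionLoopA (n.toNat + 1) n []
  (PySem.List.pyRange 0 (PySem.List.len a) 1).foldl
    (fun answer i => answer + solutionDig a i * 3 ^ i.toNat) 0

-- ===== PORT B =====
def solutionLoopB : Nat → Int → Int → Int
  | 0, _, answer => answer
  | f + 1, n, answer =>
      let answer' := answer * 3 + PySem.Int.mod n 3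
      let n' := PySem.Int.floordiv n 3
      if n' = 0 then answer' else solutionLoopB f n' answer'

def solution_alt (n : Int) : Int := solutionLoopB (n.toNat + 1) n 0

-- ===== PRECONDITION & SPEC =====
-- On n < 0 both Pythons loop forever (n //= 3 converges to -1, never 0), so A never returns there.
def Pre_solution (n : Int) : Prop := 0 ≤ n
instance (n : Int) : Decidable (Pre_solution n) := by unfold Pre_solution; infer_instance
def pvWitness_solution : Int := 5
def Spec_solution (n : Int) (out : Int) : Prop := out = solution_alt n
instance (n : Int) (out : Int) : Decidable (Spec_solution n out) := by unfold Spec_solution; infer_instance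

-- ===== CLAIM (what is proved, stated in full; the proofs are below) =====
def Claim_equal_solution : Prop := ∀ (n : Int), Dom_solution n → Pre_solution n → Spec_solution n (solution n)

-- ===== LEMMAS AND PROOFS =====

-- value of a digit-character list read LSB-first from the left: evalD [d0,d1,…] = d0 + 3*d1 + …
def evalD : List Char → Int
  | [] => 0
  | c :: t => (PySem.Int.ofChars? [c]).getD 0 + 3 * evalD t

-- every character A prepends is a single digit char; abstractly: all chars of a are
-- what toChars produces for a value in {0,1,2}, which is a single char.
lemma toChars_mod3 (n : Int) :
    PySem.Int.toChars (PySem.Int.mod n 3) = [Char.ofNat (48 + (PySem.Int.mod n 3).toNat)] ∧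
    (PySem.Int.ofChars? [Char.ofNat (48 + (PySem.Int.mod n 3).toNat)]).getD 0 = PySem.Int.mod n 3 := by
  have h0 : 0 ≤ PySem.Int.mod n 3 := PySem.Int.mod_nonneg n (by norm_num)
  have h3 : PySem.Int.mod n 3 < 3 := PySem.Int.mod_lt n (by norm_num)
  interval_cases h : PySem.Int.mod n 3 <;> simp_all <;> decide

-- the two loops run in lockstep: A's prepended digits are B's Horner accumulation
lemma loop_lockstep (f : Nat) (n : Int) (a : List Char) (answer : Int)
    (hn : 0 ≤ n) (ha : evalD a = answer) :
    evalD (solutionLoopA f n a) = solutionLoopB f n answer := by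
  induction f generalizing n a answer with
  | zero => simpa [solutionLoopA, solutionLoopB]
  | succ f ih =>
    obtain ⟨hc, hv⟩ := toChars_mod3 n
    have hstep : evalD (PySem.Int.toChars (PySem.Int.mod n 3) ++ a)
        = answer * 3 + PySem.Int.mod n 3 := by
      rw [hc]
      show evalD (_ :: a) = _
      simp only [evalD]
      rw [hv, ha]; ring
    have hn' : 0 ≤ PySem.Int.floordiv n 3 := by
      have := PySem.Int.floordiv_eq_ediv_of_pos (a := n) (b := 3) (by norm_num)
      rw [this]; exact Int.ediv_nonneg hn (by norm_num)
    simp only [solutionLoopA, solutionLoopB]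
    split
    · exact hstep
    · exact ih _ _ _ hn' hstep

-- A's second loop (sum of dig(a[i])·3^i over range(len a)) computes evalD a.
-- generalized over the starting accumulator and a power multiplier m = 3^(indices consumed).
lemma eval_loop_general (a : List Char) (acc m : Int) :
    (List.range a.length).foldl (fun answer (i : Nat) => answer + solutionDig a (i : Int) * (m * 3 ^ i)) acc
      = acc + m * evalD a := by
  induction a generalizing acc m with
  | nil => simp [evalD]
  | cons c t ih =>
    have hlen : (c :: t).length = t.length + 1 := rfl
    rw [hlen, List.range_succ_eq_map, List.foldl_cons, List.foldl_map]
    have hcong : ∀ (answer : Int), ∀ i ∈ List.range t.length,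
        answer + solutionDig (c :: t) ((i.succ : Nat) : Int) * (m * 3 ^ i.succ)
          = answer + solutionDig t (i : Int) * ((3 * m) * 3 ^ i) := by
      intro answer i _
      have h1 : ((i.succ : Nat) : Int) = (i : Int) + 1 := by push_cast; ring
      have h2 : solutionDig (c :: t) ((i : Int) + 1) = solutionDig t (i : Int) := by
        simp [solutionDig, PySem.List.pyGet?_cons_succ]
      rw [h1, h2, pow_succ]; ring
    rw [PySem.List.foldl_congr_mem _ _ _ _ hcong, ih]
    have hdig0 : solutionDig (c :: t) ((0 : Nat) : Int) = (PySem.Int.ofChars? [c]).getD 0 := by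
      simp [solutionDig]
    rw [hdig0, evalD]
    ring

-- bridge: the port's foldl over pyRange 0 (len a) 1 with exponent i.toNat equals the Nat-range form
lemma eval_loop_port (a : List Char) :
    (PySem.List.pyRange 0 (PySem.List.len a) 1).foldl
      (fun answer i => answer + solutionDig a i * 3 ^ i.toNat) 0 = evalD a := by
  rw [PySem.List.len_eq, PySem.List.pyRange_zero_natCast, List.foldl_map]
  have := eval_loop_general a 0 1
  simpa using this

-- ===== VERDICT (by name: the statement is the Claim_ definition above) =====
theorem solution_spec : Claim_equal_solution := by
  intro n _ hpre
  unfold Spec_solution solution solution_alt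
  rw [eval_loop_port]
  exact loop_lockstep (n.toNat + 1) n [] 0 hpre (by simp [evalD])
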